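-- pv_equiv track=rewrite | github.com/netodeolino/TCC | TCC 02/Extração/extrairMuitas.py | extrairRetornar
-- ===== SOURCE A (Python) =====
-- def extrairRetornar(string, inicio):
-- 	aux = ""
--
-- 	i = inicio;
-- 	while i < len(string):
-- 		if (string[i] != "."):
-- 			aux += string[i]
--
-- 		if ((string[i] == ".") and (string[i-1] == "V")):
-- 			if ((string[i-1] == "V") and (string[i-2] == "A")):
-- 				aux += string[i]
--
-- 		if ((string[i] == ".") and (string[i-1] == "R")):
-- 			if ((string[i-1] == "R") and (string[i-2] == "D")):
-- 				aux += string[i]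
--
-- 		if ((string[i] == ".") and (string[i-1] != "V")) and ((string[i] == ".") and (string[i-1] != "R")):
-- 			break
--
-- 		i += 1
--
-- 	return aux
-- ===== SOURCE B (Python) =====
-- def extrairRetornar(string, inicio):
--     n = len(string)
--     # pass 1: find the terminator position (first '.' not preceded by 'V' or 'R')
--     end = inicio
--     while end < n:
--         if string[end] == "." and string[end-1] != "V" and string[end-1] != "R":
--             break
--         end += 1
--     # pass 2: filter the scanned window
--     parts = []
--     for i in range(inicio, end):
--         c = string[i]
--         if c != ".":
--             parts.append(c)
--         elif (string[i-1] == "V" and string[i-2] == "A") or (string[i-1] == "R" and string[i-2] == "D"):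
--             parts.append(c)
--     return "".join(parts)
-- ===== Notes on version B (the rewrite author's own statement) =====
-- stated objective: alternative
-- what changed: Replaces A's single stateful while-loop with an embedded break by two independent passes: first find the terminator index (first '.' not preceded by 'V'/'R'), then filter the delimited window, accumulating pieces in a list joined once instead of quadratic string +=.
import Mathlib
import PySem

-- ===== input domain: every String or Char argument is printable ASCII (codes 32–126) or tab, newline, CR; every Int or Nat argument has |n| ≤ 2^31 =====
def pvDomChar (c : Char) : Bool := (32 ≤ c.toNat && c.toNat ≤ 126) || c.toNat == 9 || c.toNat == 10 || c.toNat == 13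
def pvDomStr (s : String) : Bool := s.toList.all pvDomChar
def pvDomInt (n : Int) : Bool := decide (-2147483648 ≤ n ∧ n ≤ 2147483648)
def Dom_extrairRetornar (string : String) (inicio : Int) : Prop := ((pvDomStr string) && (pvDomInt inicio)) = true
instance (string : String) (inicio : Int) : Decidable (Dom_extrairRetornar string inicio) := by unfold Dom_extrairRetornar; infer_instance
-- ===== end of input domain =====

-- B replaces A's single context-sensitive loop-with-break by a find-the-terminator pass
-- followed by a filter pass over the delimited window (alternative decomposition, same cost).

-- ===== PORT A =====
-- A's while-loop with break; fuel = remaining iterations (n - i), exact whenever fuel ≥ n - i.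
def extrairRetornarGo (s : List Char) (i : Int) (aux : List Char) : Nat → List Char
  | 0 => aux
  | fuel + 1 =>
    if i < (s.length : Int) then
      let c  := (PySem.List.pyGet? s i).getD ' '
      let p1 := (PySem.List.pyGet? s (i - 1)).getD ' '
      let p2 := (PySem.List.pyGet? s (i - 2)).getD ' '
      let aux1 := if c ≠ '.' then aux ++ [c] else aux
      let aux2 := if c = '.' ∧ p1 = 'V' then (if p1 = 'V' ∧ p2 = 'A' then aux1 ++ [c] else aux1) else aux1
      let aux3 := if c = '.' ∧ p1 = 'R' then (if p1 = 'R' ∧ p2 = 'D' then aux2 ++ [c] else aux2) else aux2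
      if (c = '.' ∧ p1 ≠ 'V') ∧ (c = '.' ∧ p1 ≠ 'R') then aux3
      else extrairRetornarGo s (i + 1) aux3 fuel
    else aux

def extrairRetornar (string : String) (inicio : Int) : String :=
  let s := string.toList
  String.ofList (extrairRetornarGo s inicio [] (((s.length : Int) - inicio).toNat))

-- ===== PORT B =====
-- pass 1: first index ≥ `e` holding '.' not preceded by 'V'/'R'; fuel as in A's loop
def extrairFindEnd (s : List Char) (e : Int) : Nat → Int
  | 0 => e
  | fuel + 1 =>
    if e < (s.length : Int) then
      if (PySem.List.pyGet? s e).getD ' ' = '.' ∧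
         (PySem.List.pyGet? s (e - 1)).getD ' ' ≠ 'V' ∧
         (PySem.List.pyGet? s (e - 1)).getD ' ' ≠ 'R' then e
      else extrairFindEnd s (e + 1) fuel
    else e

-- pass 2 body: what position i contributes
def extrairPiece (s : List Char) (i : Int) : List Char :=
  let c := (PySem.List.pyGet? s i).getD ' '
  if c ≠ '.' then [c]
  else if ((PySem.List.pyGet? s (i - 1)).getD ' ' = 'V' ∧ (PySem.List.pyGet? s (i - 2)).getD ' ' = 'A') ∨
          ((PySem.List.pyGet? s (i - 1)).getD ' ' = 'R' ∧ (PySem.List.pyGet? s (i - 2)).getD ' ' = 'D') then [c]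
  else []

def extrairRetornar_alt (string : String) (inicio : Int) : String :=
  let s := string.toList
  let e := extrairFindEnd s inicio (((s.length : Int) - inicio).toNat)
  String.ofList ((PySem.List.pyRange inicio e 1).foldl (fun acc i => acc ++ extrairPiece s i) [])

-- ===== PRECONDITION & SPEC =====
-- Pre_ excludes exactly the inputs where Python A raises IndexError: inicio below -len(string),
-- or a guarded string[i-1]/string[i-2] access at i = -len / i = 1-len falling below -len.
def Pre_extrairRetornar (string : String) (inicio : Int) : Prop :=
  -(string.toList.length : Int) ≤ inicio ∧
  ¬(inicio = -(string.toList.length : Int) ∧ 1 ≤ string.toList.length ∧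
      PySem.List.pyGet? string.toList 0 = some '.') ∧
  ¬(inicio ≤ 1 - (string.toList.length : Int) ∧ 2 ≤ string.toList.length ∧
      PySem.List.pyGet? string.toList 1 = some '.' ∧
      (PySem.List.pyGet? string.toList 0 = some 'V' ∨ PySem.List.pyGet? string.toList 0 = some 'R'))
instance (string : String) (inicio : Int) : Decidable (Pre_extrairRetornar string inicio) := by
  unfold Pre_extrairRetornar; infer_instance

def pvWitness_extrairRetornar : String × Int := ("AV.DR.x", 0)

def Spec_extrairRetornar (string : String) (inicio : Int) (out : String) : Prop := out = extrairRetornar_alt string inicio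
instance (string : String) (inicio : Int) (out : String) : Decidable (Spec_extrairRetornar string inicio out) := by unfold Spec_extrairRetornar; infer_instance

-- ===== CLAIM (what is proved, stated in full; the proofs are below) =====
def Claim_equal_extrairRetornar : Prop := ∀ (string : String) (inicio : Int), Dom_extrairRetornar string inicio → Pre_extrairRetornar string inicio → Spec_extrairRetornar string inicio (extrairRetornar string inicio)

-- ===== LEMMAS AND PROOFS =====

lemma extrairFindEnd_ge (s : List Char) (e : Int) (fuel : Nat) : e ≤ extrairFindEnd s e fuel := by
  induction fuel generalizing e with
  | zero => simp [extrairFindEnd]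
  | succ f ih =>
    simp only [extrairFindEnd]
    split_ifs with h1 h2
    · exact le_refl e
    · exact le_trans (by omega) (ih (e + 1))
    · exact le_refl e

-- the loop/two-pass correspondence; holds for any sufficient fuel
lemma extrairGo_eq (s : List Char) (fuel : Nat) :
    ∀ (i : Int) (aux : List Char), (s.length : Int) - i ≤ fuel →
    extrairRetornarGo s i aux fuel =
      aux ++ (PySem.List.pyRange i (extrairFindEnd s i fuel) 1).foldl
        (fun acc j => acc ++ extrairPiece s j) [] := by
  induction fuel with
  | zero =>
    intro i aux h
    have hge : (s.length : Int) ≤ i := by omega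
    simp [extrairRetornarGo, extrairFindEnd, PySem.List.pyRange_one_eq_nil (le_refl i)]
  | succ f ih =>
    intro i aux h
    by_cases hi : i < (s.length : Int)
    · simp only [extrairRetornarGo, extrairFindEnd, if_pos hi]
      set c  := (PySem.List.pyGet? s i).getD ' ' with hc
      set p1 := (PySem.List.pyGet? s (i - 1)).getD ' ' with hp1
      set p2 := (PySem.List.pyGet? s (i - 2)).getD ' ' with hp2
      by_cases hbrk : (c = '.' ∧ p1 ≠ 'V') ∧ (c = '.' ∧ p1 ≠ 'R')
      · -- break iteration: nothing appended, range empty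
        have hb' : c = '.' ∧ p1 ≠ 'V' ∧ p1 ≠ 'R' := ⟨hbrk.1.1, hbrk.1.2, hbrk.2.2⟩
        rw [if_pos hbrk, if_pos hb']
        rw [PySem.List.pyRange_one_eq_nil (le_refl i)]
        simp [hbrk.1.1, hbrk.1.2, hbrk.2.2]
      · have hb' : ¬(c = '.' ∧ p1 ≠ 'V' ∧ p1 ≠ 'R') := by
          intro hh; exact hbrk ⟨⟨hh.1, hh.2.1⟩, ⟨hh.1, hh.2.2⟩⟩
        rw [if_neg hbrk, if_neg hb']
        have hrec := ih (i + 1)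
          ((if c = '.' ∧ p1 = 'R' then (if p1 = 'R' ∧ p2 = 'D'
              then (if c = '.' ∧ p1 = 'V' then (if p1 = 'V' ∧ p2 = 'A' then (if c ≠ '.' then aux ++ [c] else aux) ++ [c] else (if c ≠ '.' then aux ++ [c] else aux)) else (if c ≠ '.' then aux ++ [c] else aux)) ++ [c]
              else (if c = '.' ∧ p1 = 'V' then (if p1 = 'V' ∧ p2 = 'A' then (if c ≠ '.' then aux ++ [c] else aux) ++ [c] else (if c ≠ '.' then aux ++ [c] else aux)) else (if c ≠ '.' then aux ++ [c] else aux)))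
            else (if c = '.' ∧ p1 = 'V' then (if p1 = 'V' ∧ p2 = 'A' then (if c ≠ '.' then aux ++ [c] else aux) ++ [c] else (if c ≠ '.' then aux ++ [c] else aux)) else (if c ≠ '.' then aux ++ [c] else aux))))
          (by omega)
        rw [hrec]
        have hlt : i < extrairFindEnd s (i + 1) f :=
          lt_of_lt_of_le (by omega) (extrairFindEnd_ge s (i + 1) f)
        rw [PySem.List.pyRange_one_cons hlt]
        rw [List.foldl_cons, PySem.List.foldl_append_eq_flatMap, PySem.List.foldl_append_eq_flatMap]
        -- it remains to show aux3 = aux ++ piece i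
        have hpiece :
            (if c = '.' ∧ p1 = 'R' then (if p1 = 'R' ∧ p2 = 'D'
                then (if c = '.' ∧ p1 = 'V' then (if p1 = 'V' ∧ p2 = 'A' then (if c ≠ '.' then aux ++ [c] else aux) ++ [c] else (if c ≠ '.' then aux ++ [c] else aux)) else (if c ≠ '.' then aux ++ [c] else aux)) ++ [c]
                else (if c = '.' ∧ p1 = 'V' then (if p1 = 'V' ∧ p2 = 'A' then (if c ≠ '.' then aux ++ [c] else aux) ++ [c] else (if c ≠ '.' then aux ++ [c] else aux)) else (if c ≠ '.' then aux ++ [c] else aux)))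
              else (if c = '.' ∧ p1 = 'V' then (if p1 = 'V' ∧ p2 = 'A' then (if c ≠ '.' then aux ++ [c] else aux) ++ [c] else (if c ≠ '.' then aux ++ [c] else aux)) else (if c ≠ '.' then aux ++ [c] else aux)))
            = aux ++ extrairPiece s i := by
          unfold extrairPiece
          rw [← hc, ← hp1, ← hp2]
          by_cases hdot : c = '.'
          · have hVR : p1 = 'V' ∨ p1 = 'R' := by
              by_contra hn; push Not at hn; exact hb' ⟨hdot, hn.1, hn.2⟩
            rcases hVR with hV | hR
            · have hnR : ¬(c = '.' ∧ p1 = 'R') := by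
                intro hh; rw [hV] at hh; exact absurd hh.2 (by decide)
              by_cases hA : p2 = 'A' <;>
                simp [hdot, hV, hA]
            · have hnV : ¬(c = '.' ∧ p1 = 'V') := by
                intro hh; rw [hR] at hh; exact absurd hh.2 (by decide)
              by_cases hD : p2 = 'D' <;>
                simp [hdot, hR, hD]
          · simp [hdot]
        rw [hpiece]
        simp
    · have hil : extrairFindEnd s i (f + 1) = i := by
        simp [extrairFindEnd, hi]
      simp [extrairRetornarGo, hi, hil, PySem.List.pyRange_one_eq_nil (le_refl i)]

-- ===== VERDICT (by name: the statement is the Claim_ definition above) =====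
theorem extrairRetornar_spec : Claim_equal_extrairRetornar := by
  intro string inicio _ _
  unfold Spec_extrairRetornar extrairRetornar extrairRetornar_alt
  exact congrArg String.ofList (extrairGo_eq string.toList _ inicio [] (by omega))
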